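-- pv_equiv track=rewrite | github.com/b-zhu524/usaco_practice | whereami/whereami.py | solve
-- ===== SOURCE A (Python) =====
-- def solve(N, farms):
--     for size in range(1, N+1):
--         substrings = set()
--         unique = True
--         for start in range(N-size+1):
--             end = start + size
--             substring = farms[start:end]
--             if substring in substrings:
--                 unique = False
--                 break
--             else:
--                 substrings.add(substring)
--
--         if unique:
--             return size
-- ===== SOURCE B (Python) =====
-- def solve(N, farms):
--     def ok(size):
--         subs = {farms[i:i + size] for i in range(N - size + 1)}
--         return len(subs) == N - size + 1
--
--     lo, hi = 1, N
--     while lo < hi: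
--         mid = (lo + hi) // 2
--         if ok(mid):
--             hi = mid
--         else:
--             lo = mid + 1
--     return lo
-- ===== Notes on version B (the rewrite author's own statement) =====
-- stated objective: alternative
-- what changed: A scans sizes 1,2,3,... and checks each with an incremental set and early break; B binary-searches the answer size, exploiting that 'all windows of this size are distinct' is monotone in the size, checking each probe by comparing the cardinality of the set of windows with the window count.
-- outside the precondition, e.g. on solve(0, 'a'): A returns None, B returns 1
import Mathlib
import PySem

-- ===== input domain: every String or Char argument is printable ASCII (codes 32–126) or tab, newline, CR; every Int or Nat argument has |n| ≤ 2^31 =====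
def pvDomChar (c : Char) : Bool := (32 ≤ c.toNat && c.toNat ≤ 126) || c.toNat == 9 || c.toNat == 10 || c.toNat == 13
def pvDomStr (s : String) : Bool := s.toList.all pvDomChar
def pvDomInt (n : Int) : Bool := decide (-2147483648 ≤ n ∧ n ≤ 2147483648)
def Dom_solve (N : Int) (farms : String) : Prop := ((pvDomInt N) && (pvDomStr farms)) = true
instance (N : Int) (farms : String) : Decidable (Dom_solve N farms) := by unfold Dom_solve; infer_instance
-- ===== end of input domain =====

-- B replaces A's linear scan over candidate sizes by a binary search on the size (the
-- "all substrings of this size are distinct" predicate is monotone in the size), each probe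
-- checked by comparing the cardinality of the set of substrings with the number of windows;
-- objective: alternative algorithm. String slices are ported over `toList` (exact: Python
-- string equality is equality of the character sequences).

-- ===== PORT A =====
-- inner `for start in range(...)` loop of A, with its early `break` and the growing set
def solveInner (xs : List Char) (size : Int) : List Int → PySem.Set (List Char) → Bool
  | [], _ => true
  | st :: rest, subs =>
    let substring := PySem.List.slice xs (some st) (some (st + size))
    if PySem.Set.contains subs substring then false
    else solveInner xs size rest (PySem.Set.add subs substring)

-- outer `for size in range(1, N+1)` loop of A (Python returns None when it falls through;
-- those inputs are excluded by Pre_solve, the port returns 0 there)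
def solveLoop (N : Int) (xs : List Char) (size : Int) : Int :=
  if h : size ≤ N then
    if solveInner xs size (PySem.List.pyRange 0 (N - size + 1)) PySem.Set.empty then size
    else solveLoop N xs (size + 1)
  else 0
termination_by (N + 1 - size).toNat
decreasing_by omega

def solve (N : Int) (farms : String) : Int := solveLoop N farms.toList 1

-- ===== PORT B =====
-- Source B's `ok(size)`: the set comprehension and the cardinality comparison
def okB (N : Int) (xs : List Char) (size : Int) : Bool :=
  PySem.Set.len (PySem.Set.ofList ((PySem.List.pyRange 0 (N - size + 1)).map
    (fun i => PySem.List.slice xs (some i) (some (i + size))))) == N - size + 1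

-- Source B's `while lo < hi` binary-search loop
def bsearch (N : Int) (xs : List Char) (lo hi : Int) : Int :=
  if h : lo < hi then
    let mid := PySem.Int.floordiv (lo + hi) 2
    have hm : lo ≤ mid ∧ mid < hi := by
      have h2 := PySem.Int.floordiv_eq_ediv_of_pos (a := lo + hi) (b := 2) (by norm_num)
      omega
    if okB N xs mid then bsearch N xs lo mid else bsearch N xs (mid + 1) hi
  else lo
termination_by (hi - lo).toNat
decreasing_by all_goals omega

def solve_alt (N : Int) (farms : String) : Int := bsearch N farms.toList 1 N

-- ===== PRECONDITION & SPEC =====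
-- Pre_ excludes N ≤ 0, where A's loop body never runs and Python returns None (not an int).
def Pre_solve (N : Int) (farms : String) : Prop := 1 ≤ N
instance (N : Int) (farms : String) : Decidable (Pre_solve N farms) := by unfold Pre_solve; infer_instance
def pvWitness_solve : Int × String := (3, "aba")

def Spec_solve (N : Int) (farms : String) (out : Int) : Prop := out = solve_alt N farms
instance (N : Int) (farms : String) (out : Int) : Decidable (Spec_solve N farms out) := by unfold Spec_solve; infer_instance

-- ===== CLAIM (what is proved, stated in full; the proofs are below) =====
def Claim_equal_solve : Prop := ∀ (N : Int) (farms : String), Dom_solve N farms → Pre_solve N farms → Spec_solve N farms (solve N farms)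

-- ===== LEMMAS AND PROOFS =====

-- the list of all windows of a given size, shared vocabulary of the proofs
def subL (N : Int) (xs : List Char) (s : Int) : List (List Char) :=
  (PySem.List.pyRange 0 (N - s + 1)).map (fun i => PySem.List.slice xs (some i) (some (i + s)))

lemma slice_drop_take (xs : List Char) (s : Int) (hs : 0 ≤ s) (k : Nat) :
    PySem.List.slice xs (some ((0 : Int) + (k : Int))) (some ((0 : Int) + (k : Int) + s))
      = List.take s.toNat (xs.drop k) := by
  have h1 : (0 : Int) + (k : Int) = ((k : Nat) : Int) := by push_cast; ring
  rw [h1]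
  rw [show ((k : Int) + s = ((k + s.toNat : Nat) : Int)) from by push_cast; omega,
    PySem.List.slice_natCast]
  congr 1
  omega

lemma subL_nodup_iff (N : Int) (xs : List Char) (s : Int) (hs : 0 ≤ s) :
    (subL N xs s).Nodup ↔ ∀ i j : Nat, i < j → (j : Int) < N - s + 1 →
      List.take s.toNat (xs.drop i) ≠ List.take s.toNat (xs.drop j) := by
  unfold subL
  rw [List.Nodup, List.pairwise_map, List.pairwise_iff_getElem]
  simp only [PySem.List.length_pyRange_one, PySem.List.getElem_pyRange_one,
    slice_drop_take xs s hs]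
  constructor
  · intro h i j hij hj
    exact h i j (by omega) (by omega) hij
  · intro h i j hi hj hij
    exact h i j hij (by omega)

lemma subL_mono_step (N : Int) (xs : List Char) (s : Int) (hs : 0 ≤ s) :
    (subL N xs s).Nodup → (subL N xs (s + 1)).Nodup := by
  rw [subL_nodup_iff N xs s hs, subL_nodup_iff N xs (s + 1) (by omega)]
  intro h i j hij hj heq
  have htake : ∀ l : List Char, List.take s.toNat l = List.take s.toNat (List.take (s + 1).toNat l) := by
    intro l; rw [List.take_take]; congr 1; omega
  exact h i j hij (by omega) (by rw [htake (xs.drop i), htake (xs.drop j), heq])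

lemma subL_mono (N : Int) (xs : List Char) (s t : Int) (hs : 0 ≤ s) (hst : s ≤ t) :
    (subL N xs s).Nodup → (subL N xs t).Nodup := by
  intro h
  have key : ∀ d : Nat, (subL N xs (s + (d : Int))).Nodup := by
    intro d
    induction d with
    | zero => simpa using h
    | succ n ih =>
      have h2 := subL_mono_step N xs (s + (n : Int)) (by omega) ih
      have h3 : s + ((n : Int) + 1) = s + (n : Int) + 1 := by ring
      rw [show ((n + 1 : Nat) : Int) = (n : Int) + 1 by push_cast; ring, h3]
      exact h2
  have := key (t - s).toNat
  rwa [show s + ((t - s).toNat : Int) = t by omega] at this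

lemma subL_top (N : Int) (xs : List Char) : (subL N xs N).Nodup := by
  unfold subL
  rw [show N - N + 1 = 0 + 1 by ring, PySem.List.pyRange_one_singleton]
  simp

-- characterisation of A's inner loop: true ↔ the windows are pairwise distinct and avoid the set
lemma solveInner_iff (xs : List Char) (s : Int) :
    ∀ (starts : List Int) (S : PySem.Set (List Char)),
      (solveInner xs s starts S = true ↔
        ((starts.map (fun i => PySem.List.slice xs (some i) (some (i + s)))).Nodup ∧
          ∀ x ∈ starts.map (fun i => PySem.List.slice xs (some i) (some (i + s))), ¬ x ∈ S)) := by
  intro starts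
  induction starts with
  | nil => intro S; simp [solveInner]
  | cons a rest ih =>
    intro S
    rw [show solveInner xs s (a :: rest) S =
        (if PySem.Set.contains S (PySem.List.slice xs (some a) (some (a + s))) then false
         else solveInner xs s rest
           (PySem.Set.add S (PySem.List.slice xs (some a) (some (a + s))))) from rfl]
    by_cases hc : PySem.Set.contains S (PySem.List.slice xs (some a) (some (a + s))) = true
    · have hmem : PySem.List.slice xs (some a) (some (a + s)) ∈ S := by
        simpa [PySem.Set.contains] using hc
      rw [if_pos hc]
      constructor
      · intro h; exact absurd h (by simp)
      · rintro ⟨-, hall⟩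
        have hin : PySem.List.slice xs (some a) (some (a + s)) ∈
            (a :: rest).map (fun i => PySem.List.slice xs (some i) (some (i + s))) := by
          rw [List.map_cons]; exact List.mem_cons_self ..
        exact absurd hmem (hall _ hin)
    · have hnmem : ¬ PySem.List.slice xs (some a) (some (a + s)) ∈ S := by
        simpa [PySem.Set.contains] using hc
      rw [if_neg hc, ih, List.map_cons, List.nodup_cons]
      constructor
      · rintro ⟨hnd, hall⟩
        refine ⟨⟨?_, hnd⟩, ?_⟩
        · intro hmem2
          exact (hall _ hmem2) ((PySem.Set.mem_add S _ _).mpr (Or.inr rfl))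
        · intro x hx
          rcases List.mem_cons.mp hx with hx | hx
        
          · exact hx ▸ hnmem
          · intro hxS
            exact (hall x hx) ((PySem.Set.mem_add S _ _).mpr (Or.inl hxS))
      · rintro ⟨⟨hhead, hnd⟩, hall⟩
        refine ⟨hnd, ?_⟩
        intro x hx hxadd
        rcases (PySem.Set.mem_add S _ _).mp hxadd with hxS | hxa
        · exact hall x (List.mem_cons.mpr (Or.inr hx)) hxS
        · exact hhead (hxa ▸ hx)

lemma okA_iff (N : Int) (xs : List Char) (s : Int) :
    (solveInner xs s (PySem.List.pyRange 0 (N - s + 1)) PySem.Set.empty = true) ↔ (subL N xs s).Nodup := by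
  rw [solveInner_iff]
  unfold subL
  simp [PySem.Set.empty]

-- PySem.Set.ofList is the identity on a duplicate-free list …
lemma foldl_add_of_nodup (L : List (List Char)) :
    ∀ (s : List (List Char)), L.Nodup → (∀ x ∈ L, ¬ x ∈ s) →
      List.foldl PySem.Set.add s L = s ++ L := by
  induction L with
  | nil => intro s _ _; simp
  | cons a l ih =>
    intro s hnd hdisj
    have hns : ¬ a ∈ s := hdisj a (by simp)
    have hadd : PySem.Set.add s a = s ++ [a] := by
      rw [PySem.Set.add, if_neg]
      simpa [PySem.Set.contains] using hns
    simp only [List.foldl_cons, hadd]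
    rw [ih (s ++ [a]) (List.nodup_cons.mp hnd).2]
    · simp
    · intro x hx
      simp only [List.mem_append, List.mem_singleton]
      rintro (hxs | hxa)
      · exact hdisj x (by simp [hx]) hxs
      · exact (List.nodup_cons.mp hnd).1 (hxa ▸ hx)

lemma ofList_of_nodup (L : List (List Char)) (h : L.Nodup) : PySem.Set.ofList L = L := by
  rw [PySem.Set.ofList]
  have := foldl_add_of_nodup L PySem.Set.empty h (by intro x _; simp [PySem.Set.empty])
  simpa [PySem.Set.empty] using this

-- … and conversely equal cardinality forces the list to be duplicate-free
lemma nodup_of_ofList_length (L : List (List Char))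
    (h : (PySem.Set.ofList L).length = L.length) : L.Nodup := by
  have h1 := PySem.Set.nodup_ofList L
  have h2 : (PySem.Set.ofList L).Perm L.dedup :=
    (List.perm_ext_iff_of_nodup h1 (List.nodup_dedup L)).mpr
      (by intro a; rw [PySem.Set.mem_ofList, List.mem_dedup])
  have h3 : L.dedup.length = L.length := by rw [← h2.length_eq, h]
  have h4 : L.dedup = L := (List.dedup_sublist L).eq_of_length h3
  rw [← h4]
  exact List.nodup_dedup L

lemma okB_iff (N : Int) (xs : List Char) (s : Int) (h2 : s ≤ N) :
    okB N xs s = true ↔ (subL N xs s).Nodup := by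
  have hlen : (subL N xs s).length = (N - s + 1).toNat := by
    unfold subL
    rw [List.length_map, PySem.List.length_pyRange_one]
    congr 1
    omega
  rw [okB, beq_iff_eq]
  show (PySem.Set.len (PySem.Set.ofList (subL N xs s)) = N - s + 1) ↔ _
  rw [PySem.Set.len]
  constructor
  · intro h
    apply nodup_of_ofList_length
    omega
  · intro h
    rw [ofList_of_nodup _ h, hlen]
    omega

lemma solveLoop_spec (N : Int) (xs : List Char) (s : Int) :
    1 ≤ s → s ≤ N → (∀ t, 1 ≤ t → t < s → ¬ (subL N xs t).Nodup) →
      (1 ≤ solveLoop N xs s ∧ solveLoop N xs s ≤ N ∧ (subL N xs (solveLoop N xs s)).Nodup ∧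
        ∀ t, 1 ≤ t → t < solveLoop N xs s → ¬ (subL N xs t).Nodup) := by
  induction s using solveLoop.induct (N := N) (xs := xs) with
  | case1 s hle hok =>
    intro h1 h2 hexc
    rw [solveLoop, dif_pos hle, if_pos hok]
    exact ⟨h1, hle, (okA_iff N xs s).mp hok, hexc⟩
  | case2 s hle hok ih =>
    intro h1 h2 hexc
    have hnods : ¬ (subL N xs s).Nodup := fun hn => hok ((okA_iff N xs s).mpr hn)
    have hsN : s < N := by
      rcases lt_or_eq_of_le h2 with h | h
      · exact h
      · exact absurd (h ▸ subL_top N xs) hnods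
    rw [solveLoop, dif_pos hle, if_neg hok]
    apply ih (by omega) (by omega)
    intro t ht1 ht2
    rcases lt_or_eq_of_le (by omega : t ≤ s) with h | h
    · exact hexc t ht1 h
    · exact h ▸ hnods
  | case3 s hle =>
    intro h1 h2 hexc
    exact absurd h2 hle

lemma bsearch_spec (N : Int) (xs : List Char) (lo hi : Int) :
    1 ≤ lo → lo ≤ hi → hi ≤ N → (subL N xs hi).Nodup →
      (∀ t, 1 ≤ t → t < lo → ¬ (subL N xs t).Nodup) →
      (lo ≤ bsearch N xs lo hi ∧ bsearch N xs lo hi ≤ hi ∧ (subL N xs (bsearch N xs lo hi)).Nodup ∧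
        ∀ t, 1 ≤ t → t < bsearch N xs lo hi → ¬ (subL N xs t).Nodup) := by
  induction lo, hi using bsearch.induct (N := N) (xs := xs) with
  | case1 lo hi hlt mid hm hok ih =>
    intro h1 h2 h3 hP hexc
    have hstep : bsearch N xs lo hi =
        if okB N xs mid = true then bsearch N xs lo mid else bsearch N xs (mid + 1) hi := by
      rw [bsearch, dif_pos hlt]
    rw [hstep, if_pos hok]
    have hPmid : (subL N xs mid).Nodup := (okB_iff N xs mid (by omega)).mp hok
    have := ih h1 hm.1 (by omega) hPmid hexc
    exact ⟨this.1, by omega, this.2.2⟩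
  | case2 lo hi hlt mid hm hok ih =>
    intro h1 h2 h3 hP hexc
    have hstep : bsearch N xs lo hi =
        if okB N xs mid = true then bsearch N xs lo mid else bsearch N xs (mid + 1) hi := by
      rw [bsearch, dif_pos hlt]
    rw [hstep, if_neg hok]
    have hPmid : ¬ (subL N xs mid).Nodup :=
      fun hn => hok ((okB_iff N xs mid (by omega)).mpr hn)
    have hexc' : ∀ t, 1 ≤ t → t < mid + 1 → ¬ (subL N xs t).Nodup := by
      intro t ht1 ht2
      by_cases htlo : t < lo
      · exact hexc t ht1 htlo
      · intro hn
        exact hPmid (subL_mono N xs t mid (by omega) (by omega) hn)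
    have := ih (by omega) (by omega) h3 hP hexc'
    exact ⟨by omega, this.2.1, this.2.2⟩
  | case3 lo hi hlt =>
    intro h1 h2 h3 hP hexc
    rw [bsearch, dif_neg hlt]
    have : lo = hi := by omega
    exact ⟨le_refl lo, h2, this ▸ hP, hexc⟩

-- ===== VERDICT (by name: the statement is the Claim_ definition above) =====
theorem solve_spec : Claim_equal_solve := by
  unfold Claim_equal_solve
  intro N farms _hdom hpre
  have h1 : (1 : Int) ≤ N := hpre
  unfold Spec_solve solve solve_alt
  have hA := solveLoop_spec N farms.toList 1 (le_refl 1) h1 (by intro t ht1 ht2; omega)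
  have hB := bsearch_spec N farms.toList 1 N (le_refl 1) h1 (le_refl N) (subL_top N farms.toList)
    (by intro t ht1 ht2; omega)
  obtain ⟨a1, a2, a3, a4⟩ := hA
  obtain ⟨b1, b2, b3, b4⟩ := hB
  rcases lt_trichotomy (solveLoop N farms.toList 1) (bsearch N farms.toList 1 N) with h | h | h
  · exact absurd a3 (b4 _ a1 h)
  · exact h
  · exact absurd b3 (a4 _ b1 h)
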